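-- pv_equiv track=rewrite | github.com/JiananZhuang/code1161 | week3/exercise1.py | gene_krupa_range
-- ===== SOURCE A (Python) =====
-- def gene_krupa_range(start, stop, even_step, odd_step):
--     """Make a range that has two step sizes.
--
--     make a list that instead of having evenly spaced steps
--     has odd steps be one size and even steps be another.
--     """
--
--     d_list = []
--     d = start
--     flag = 0
--     while d < stop:
--         d_list.append(d)
--         if flag % 2 == 0:
--             d += even_step
--         else:
--             d += odd_step
--         flag += 1
--     return d_list
-- ===== SOURCE B (Python) =====
-- def gene_krupa_range(start, stop, even_step, odd_step):
--     """Closed-form rebuild: compute the element count m by ceiling division,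
--     then emit each element directly from its index."""
--     if start >= stop:
--         return []
--     s = even_step + odd_step
--     if s > 0:
--         k0 = -((start - stop) // s)                # first even-indexed element >= stop is index 2*k0
--         k1 = max(0, -((start + even_step - stop) // s))  # first odd-indexed one is index 2*k1+1
--         m = min(2 * k0, 2 * k1 + 1)
--         return [start + (i // 2) * s + (i % 2) * even_step for i in range(m)]
--     if start + even_step >= stop:
--         return [start]
--     raise ValueError("gene_krupa_range would never terminate for these arguments")
-- ===== Notes on version B (the rewrite author's own statement) =====
-- stated objective: alternative
-- what changed: Replaces the flag-counting while-loop by a closed form: the output length m is computed with two ceiling divisions and every element is emitted directly from its index as start + (i//2)*(even_step+odd_step) + (i%2)*even_step.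
import Mathlib
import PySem

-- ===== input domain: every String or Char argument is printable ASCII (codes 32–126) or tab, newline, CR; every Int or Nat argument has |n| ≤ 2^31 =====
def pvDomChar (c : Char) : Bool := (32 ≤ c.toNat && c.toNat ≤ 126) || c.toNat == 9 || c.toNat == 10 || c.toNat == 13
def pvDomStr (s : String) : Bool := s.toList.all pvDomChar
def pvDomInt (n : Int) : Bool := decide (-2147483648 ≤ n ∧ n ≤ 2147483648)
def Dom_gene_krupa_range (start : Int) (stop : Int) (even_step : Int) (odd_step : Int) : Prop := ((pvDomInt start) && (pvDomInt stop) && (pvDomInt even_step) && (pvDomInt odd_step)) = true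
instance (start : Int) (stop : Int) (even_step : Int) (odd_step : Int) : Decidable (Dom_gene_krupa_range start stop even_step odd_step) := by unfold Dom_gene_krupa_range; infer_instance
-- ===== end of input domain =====

-- B replaces A's flag-counting while-loop by a closed form: the element count m is
-- computed by ceiling division and every element is emitted directly from its index
-- (objective: alternative decomposition; A's loop is ported with sufficient fuel,
-- which is exact on Pre_, the inputs where the Python loop terminates).


-- ===== PORT A =====
-- A's while-loop, step for step; the fuel 2*((stop-start).toNat+2) is strictly more
-- than the number of iterations on every input of Pre_ (proved below), so on Pre_
-- this is exactly Python's loop.  flag starts at 0 and only increments, so Lean's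
-- `% 2` on it agrees with Python's `% 2`.
-- `d_list.append(d)` is ported as cons onto a reversed accumulator, reversed at the end
def pvLoopA (stop even_step odd_step : Int) : Nat → Int → Int → List Int → List Int
  | 0, _, _, d_list => d_list.reverse
  | n + 1, d, flag, d_list =>
    if d < stop then
      pvLoopA stop even_step odd_step n
        (d + (if flag % 2 == 0 then even_step else odd_step)) (flag + 1) (d :: d_list)
    else d_list.reverse

def gene_krupa_range (start : Int) (stop : Int) (even_step : Int) (odd_step : Int) : List Int :=
  pvLoopA stop even_step odd_step (2 * ((stop - start).toNat + 2)) start 0 []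

-- ===== PORT B =====
def gene_krupa_range_alt (start : Int) (stop : Int) (even_step : Int) (odd_step : Int) : List Int :=
  if stop ≤ start then []
  else
    let s := even_step + odd_step
    if 0 < s then
      let k0 := -(PySem.Int.floordiv (start - stop) s)
      let k1 := max 0 (-(PySem.Int.floordiv (start + even_step - stop) s))
      let m := min (2 * k0) (2 * k1 + 1)
      (PySem.List.pyRange 0 m 1).map
        (fun i => start + PySem.Int.floordiv i 2 * s + PySem.Int.mod i 2 * even_step)
    else
      if stop ≤ start + even_step then [start]
      else []  -- Source B raises ValueError here; this branch is outside Pre_ (A loops forever)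

-- ===== PRECONDITION & SPEC =====
-- Pre_ excludes exactly the inputs on which Python's A loops forever (no value is
-- ever returned there): it holds iff the while-loop terminates.
def Pre_gene_krupa_range (start : Int) (stop : Int) (even_step : Int) (odd_step : Int) : Prop :=
  stop ≤ start ∨ 0 < even_step + odd_step ∨ stop ≤ start + even_step
instance (start : Int) (stop : Int) (even_step : Int) (odd_step : Int) : Decidable (Pre_gene_krupa_range start stop even_step odd_step) := by unfold Pre_gene_krupa_range; infer_instance

def pvWitness_gene_krupa_range : Int × Int × Int × Int := (0, 10, 3, 1)

def Spec_gene_krupa_range (start : Int) (stop : Int) (even_step : Int) (odd_step : Int) (out : List Int) : Prop := out = gene_krupa_range_alt start stop even_step odd_step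
instance (start : Int) (stop : Int) (even_step : Int) (odd_step : Int) (out : List Int) : Decidable (Spec_gene_krupa_range start stop even_step odd_step out) := by unfold Spec_gene_krupa_range; infer_instance

-- ===== CLAIM (what is proved, stated in full; the proofs are below) =====
def Claim_equal_gene_krupa_range : Prop := ∀ (start : Int) (stop : Int) (even_step : Int) (odd_step : Int), Dom_gene_krupa_range start stop even_step odd_step → Pre_gene_krupa_range start stop even_step odd_step → Spec_gene_krupa_range start stop even_step odd_step (gene_krupa_range start stop even_step odd_step)

-- ===== LEMMAS AND PROOFS =====

-- the element count of B at lower end d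
def pvM (stop even_step odd_step d : Int) : Int :=
  min (2 * (-(PySem.Int.floordiv (d - stop) (even_step + odd_step))))
      (2 * (max 0 (-(PySem.Int.floordiv (d + even_step - stop) (even_step + odd_step)))) + 1)

-- B's closed form, rewritten over Nat indices (proof-side normal form)
def pvClosed (stop even_step odd_step d : Int) : List Int :=
  (List.range (pvM stop even_step odd_step d).toNat).map
    (fun k => d + ((k / 2 : Nat) : Int) * (even_step + odd_step) + ((k % 2 : Nat) : Int) * even_step)

-- reference: the loop grouped into even/odd pairs, fueled by pair count
def pvRef (stop even_step odd_step : Int) : Nat → Int → List Int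
  | 0, _ => []
  | n + 1, d =>
    if d < stop then
      if d + even_step < stop then
        d :: (d + even_step) :: pvRef stop even_step odd_step n (d + even_step + odd_step)
      else [d]
    else []

theorem pv_ediv_neg {a s : Int} (ha : a < 0) (hs : 0 < s) : a / s < 0 := by
  by_contra h
  push Not at h
  have h1 := Int.mul_ediv_add_emod a s
  have h2 := Int.emod_nonneg a (by omega : s ≠ 0)
  have h3 : 0 ≤ s * (a / s) := mul_nonneg (by omega) h
  omega

theorem pvM_nonpos (stop even_step odd_step d : Int) (hs : 0 < even_step + odd_step)
    (hd : stop ≤ d) : pvM stop even_step odd_step d ≤ 0 := by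
  unfold pvM
  rw [PySem.Int.floordiv_eq_ediv_of_pos hs, PySem.Int.floordiv_eq_ediv_of_pos hs]
  have h0 : 0 ≤ (d - stop) / (even_step + odd_step) :=
    Int.ediv_nonneg (by omega) (by omega)
  omega

theorem pvM_one (stop even_step odd_step d : Int) (hs : 0 < even_step + odd_step)
    (hd : d < stop) (he : stop ≤ d + even_step) : pvM stop even_step odd_step d = 1 := by
  unfold pvM
  rw [PySem.Int.floordiv_eq_ediv_of_pos hs, PySem.Int.floordiv_eq_ediv_of_pos hs]
  have h0 : (d - stop) / (even_step + odd_step) < 0 := pv_ediv_neg (by omega) hs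
  have h1 : 0 ≤ (d + even_step - stop) / (even_step + odd_step) :=
    Int.ediv_nonneg (by omega) (by omega)
  omega

theorem pvM_step (stop even_step odd_step d : Int) (hs : 0 < even_step + odd_step)
    (hd : d < stop) (he : d + even_step < stop) :
    pvM stop even_step odd_step d = pvM stop even_step odd_step (d + even_step + odd_step) + 2 ∧
      0 ≤ pvM stop even_step odd_step (d + even_step + odd_step) := by
  unfold pvM
  rw [PySem.Int.floordiv_eq_ediv_of_pos hs, PySem.Int.floordiv_eq_ediv_of_pos hs,
    PySem.Int.floordiv_eq_ediv_of_pos hs, PySem.Int.floordiv_eq_ediv_of_pos hs]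
  have e0 : (d + even_step + odd_step - stop) / (even_step + odd_step)
      = (d - stop) / (even_step + odd_step) + 1 := by
    have := Int.add_mul_ediv_right (d - stop) 1 (show even_step + odd_step ≠ 0 by omega)
    rw [one_mul] at this
    rw [show d + even_step + odd_step - stop = d - stop + (even_step + odd_step) by ring, this]
  have e1 : (d + even_step + odd_step + even_step - stop) / (even_step + odd_step)
      = (d + even_step - stop) / (even_step + odd_step) + 1 := by
    have := Int.add_mul_ediv_right (d + even_step - stop) 1
      (show even_step + odd_step ≠ 0 by omega)
    rw [one_mul] at this
    rw [show d + even_step + odd_step + even_step - stop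
        = d + even_step - stop + (even_step + odd_step) by ring, this]
  have h0 : (d - stop) / (even_step + odd_step) < 0 := pv_ediv_neg (by omega) hs
  have h1 : (d + even_step - stop) / (even_step + odd_step) < 0 := pv_ediv_neg (by omega) hs
  rw [e0, e1]
  omega

-- the closed form satisfies the paired-loop recursion
theorem pvClosed_stop (stop even_step odd_step d : Int) (hs : 0 < even_step + odd_step)
    (hd : stop ≤ d) : pvClosed stop even_step odd_step d = [] := by
  unfold pvClosed
  have := pvM_nonpos stop even_step odd_step d hs hd
  rw [show (pvM stop even_step odd_step d).toNat = 0 by omega]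
  simp

theorem pvClosed_one (stop even_step odd_step d : Int) (hs : 0 < even_step + odd_step)
    (hd : d < stop) (he : stop ≤ d + even_step) : pvClosed stop even_step odd_step d = [d] := by
  unfold pvClosed
  rw [pvM_one stop even_step odd_step d hs hd he]
  simp

theorem pvClosed_step (stop even_step odd_step d : Int) (hs : 0 < even_step + odd_step)
    (hd : d < stop) (he : d + even_step < stop) :
    pvClosed stop even_step odd_step d
      = d :: (d + even_step) :: pvClosed stop even_step odd_step (d + even_step + odd_step) := by
  obtain ⟨hm, hm0⟩ := pvM_step stop even_step odd_step d hs hd he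
  unfold pvClosed
  rw [hm]
  rw [show (pvM stop even_step odd_step (d + even_step + odd_step) + 2).toNat
      = (pvM stop even_step odd_step (d + even_step + odd_step)).toNat + 2 by omega]
  rw [List.range_succ_eq_map, List.range_succ_eq_map]
  simp only [List.map_cons, List.map_map]
  congr 1
  · simp
  congr 1
  · simp
  · apply List.map_congr_left
    intro k _
    simp only [Function.comp]
    have h2 : (Nat.succ (Nat.succ k)) / 2 = k / 2 + 1 := by omega
    have h3 : (Nat.succ (Nat.succ k)) % 2 = k % 2 := by omega
    rw [h2, h3]
    push_cast
    ring

-- the paired reference equals the closed form (fuel n large enough)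
theorem pvRef_eq_closed (stop even_step odd_step : Int) (hs : 0 < even_step + odd_step) :
    ∀ (n : Nat) (d : Int), stop - d ≤ (n : Int) * (even_step + odd_step) →
      pvRef stop even_step odd_step n d = pvClosed stop even_step odd_step d := by
  intro n
  induction n with
  | zero =>
    intro d hle
    simp only [Nat.cast_zero, zero_mul] at hle
    rw [pvClosed_stop stop even_step odd_step d hs (by omega)]
    rfl
  | succ n ih =>
    intro d hle
    by_cases hd : d < stop
    · by_cases he : d + even_step < stop
      · rw [pvClosed_step stop even_step odd_step d hs hd he]
        show (if d < stop then _ else _) = _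
        rw [if_pos hd, if_pos he]
        have hc : ((n + 1 : Nat) : Int) * (even_step + odd_step)
            = (n : Int) * (even_step + odd_step) + (even_step + odd_step) := by
          push_cast; ring
        have : stop - (d + even_step + odd_step) ≤ (n : Int) * (even_step + odd_step) := by
          rw [hc] at hle; linarith
        rw [ih (d + even_step + odd_step) this]
      · rw [pvClosed_one stop even_step odd_step d hs hd (by omega)]
        show (if d < stop then _ else _) = _
        rw [if_pos hd, if_neg he]
    · rw [pvClosed_stop stop even_step odd_step d hs (by omega)]
      show (if d < stop then _ else _) = _
      rw [if_neg hd]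

-- A's loop, run with an even flag and enough fuel, is the paired reference
theorem pvLoopA_eq_ref (stop even_step odd_step : Int) :
    ∀ (n : Nat) (d flag : Int) (acc : List Int), flag % 2 = 0 →
      stop - d ≤ (n : Int) * (even_step + odd_step) →
      pvLoopA stop even_step odd_step (2 * n) d flag acc
        = acc.reverse ++ pvRef stop even_step odd_step n d := by
  intro n
  induction n with
  | zero =>
    intro d flag acc _ _
    simp [pvLoopA, pvRef]
  | succ n ih =>
    intro d flag acc hflag hle
    rw [show 2 * (n + 1) = (2 * n + 1) + 1 by omega]
    show (if d < stop then _ else _) = _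
    by_cases hd : d < stop
    · rw [if_pos hd]
      rw [if_pos (show (flag % 2 == 0) = true by simp [hflag])]
      show (if d + even_step < stop then _ else _) = _
      have hflag1 : ((flag + 1) % 2 == 0) = false := by
        have : (flag + 1) % 2 = 1 := by omega
        simp [this]
      rw [if_neg (show ¬ ((flag + 1) % 2 == 0) = true by simp [hflag1])]
      by_cases he : d + even_step < stop
      · rw [if_pos he]
        have hc : ((n + 1 : Nat) : Int) * (even_step + odd_step)
            = (n : Int) * (even_step + odd_step) + (even_step + odd_step) := by
          push_cast; ring
        have hle' : stop - (d + even_step + odd_step) ≤ (n : Int) * (even_step + odd_step) := by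
          rw [hc] at hle; linarith
        rw [ih (d + even_step + odd_step) (flag + 1 + 1) ((d + even_step) :: d :: acc)
          (by omega) hle']
        rw [show pvRef stop even_step odd_step (n + 1) d
            = d :: (d + even_step) :: pvRef stop even_step odd_step n (d + even_step + odd_step) by
          show (if d < stop then _ else _) = _
          rw [if_pos hd, if_pos he]]
        simp
      · rw [if_neg he]
        rw [show pvRef stop even_step odd_step (n + 1) d = [d] by
          show (if d < stop then _ else _) = _
          rw [if_pos hd, if_neg he]]
        simp
    · rw [if_neg hd]
      rw [show pvRef stop even_step odd_step (n + 1) d = [] by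
        show (if d < stop then _ else _) = _
        rw [if_neg hd]]
      simp

-- B's port equals the closed form in the progressing case
theorem pvAlt_eq_closed (start stop even_step odd_step : Int) (hlt : ¬ stop ≤ start)
    (hs : 0 < even_step + odd_step) :
    gene_krupa_range_alt start stop even_step odd_step
      = pvClosed stop even_step odd_step start := by
  unfold gene_krupa_range_alt
  rw [if_neg hlt]
  simp only [if_pos hs]
  unfold pvClosed pvM
  rw [PySem.List.pyRange_one, List.map_map]
  rw [show ((min (2 * (-(PySem.Int.floordiv (start - stop) (even_step + odd_step))))
        (2 * (max 0 (-(PySem.Int.floordiv (start + even_step - stop) (even_step + odd_step)))) + 1))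
        - 0) = min (2 * (-(PySem.Int.floordiv (start - stop) (even_step + odd_step))))
        (2 * (max 0 (-(PySem.Int.floordiv (start + even_step - stop) (even_step + odd_step)))) + 1)
      by ring]
  apply List.map_congr_left
  intro k _
  simp only [Function.comp, zero_add]
  have h2 : PySem.Int.floordiv ((k : Nat) : Int) 2 = ((k / 2 : Nat) : Int) := by
    exact_mod_cast PySem.Int.floordiv_natCast k 2
  have h3 : PySem.Int.mod ((k : Nat) : Int) 2 = ((k % 2 : Nat) : Int) := by
    exact_mod_cast PySem.Int.mod_natCast k 2
  rw [h2, h3]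

-- ===== VERDICT (by name: the statement is the Claim_ definition above) =====
theorem gene_krupa_range_spec : Claim_equal_gene_krupa_range := by
  intro start stop even_step odd_step _ hpre
  unfold Spec_gene_krupa_range
  unfold gene_krupa_range
  by_cases hge : stop ≤ start
  · -- loop body never runs
    rw [show 2 * ((stop - start).toNat + 2) = (2 * (stop - start).toNat + 3) + 1 by omega]
    show (if start < stop then _ else _) = _
    rw [if_neg (by omega)]
    unfold gene_krupa_range_alt
    rw [if_pos hge]
    simp
  · by_cases hs : 0 < even_step + odd_step
    · -- progressing case: loop = paired reference = closed form = B
      have hN : stop - start ≤ (((stop - start).toNat + 2 : Nat) : Int) * (even_step + odd_step) := by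
        have h1 : stop - start ≤ (((stop - start).toNat + 2 : Nat) : Int) := by
          push_cast; omega
        have h2 : (((stop - start).toNat + 2 : Nat) : Int) * 1
            ≤ (((stop - start).toNat + 2 : Nat) : Int) * (even_step + odd_step) := by
          apply mul_le_mul_of_nonneg_left (by omega) (by positivity)
        omega
      rw [pvLoopA_eq_ref stop even_step odd_step ((stop - start).toNat + 2) start 0 []
        (by omega) hN]
      rw [pvRef_eq_closed stop even_step odd_step hs ((stop - start).toNat + 2) start hN]
      rw [pvAlt_eq_closed start stop even_step odd_step hge hs]
      simp
    · -- no net progress but the first even step already reaches stop: exactly one element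
      have he : stop ≤ start + even_step := by
        rcases hpre with h | h | h
        · omega
        · omega
        · exact h
      rw [show 2 * ((stop - start).toNat + 2) = ((2 * (stop - start).toNat + 2) + 1) + 1 by omega]
      show (if start < stop then _ else _) = _
      rw [if_pos (by omega)]
      rw [if_pos (show ((0 : Int) % 2 == 0) = true by simp)]
      show (if start + even_step < stop then _ else _) = _
      rw [if_neg (by omega)]
      unfold gene_krupa_range_alt
      rw [if_neg hge]
      simp only [if_neg hs]
      rw [if_pos he]
      simp
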